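-- pv_equiv track=rewrite | github.com/felipefraxe/ADBib | trans2.py | conaway
-- ===== SOURCE A (Python) =====
-- def conaway(data):
--     max, min, min_index, max_index = data[0], data[0], 0, 0
--     for i in range(1, len(data)):
--         if data[i] > max:
--             max_index = i
--             max = data[i]
--         if data[i] < min:
--             min_index = i
--             min = data[i]
--
--     if min_index > max_index:
--         return min_index
--     return max_index
-- ===== SOURCE B (Python) =====
-- def conaway(data):
--     first = {}
--     for i, v in enumerate(data):
--         first.setdefault(v, i)
--     return max(first[max(first)], first[min(first)])
-- ===== Notes on version B (the rewrite author's own statement) =====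
-- stated objective: alternative
-- what changed: Builds a first-occurrence index dictionary in one pass (dict.setdefault over enumerate), then takes max and min over the dict keys and looks up their first indices, instead of A's four-variable running-extremes loop.
import Mathlib
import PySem

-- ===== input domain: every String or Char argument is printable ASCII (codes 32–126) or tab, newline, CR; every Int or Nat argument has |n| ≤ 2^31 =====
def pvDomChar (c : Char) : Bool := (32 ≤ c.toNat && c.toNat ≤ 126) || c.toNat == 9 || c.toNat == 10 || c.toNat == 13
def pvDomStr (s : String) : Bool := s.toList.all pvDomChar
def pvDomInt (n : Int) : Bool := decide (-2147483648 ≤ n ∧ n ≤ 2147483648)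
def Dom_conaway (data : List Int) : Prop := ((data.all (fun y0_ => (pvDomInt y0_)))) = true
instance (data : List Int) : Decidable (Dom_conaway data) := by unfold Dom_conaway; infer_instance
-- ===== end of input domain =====

-- B replaces A's four-variable running-extremes loop by a first-occurrence index
-- dictionary built in one pass, then max/min over the dict keys and two lookups (alternative).

-- ===== PORT A =====
-- one loop iteration of A: state is (max, min, min_index, max_index)
def conawayStep (data : List Int) (s : Int × Int × Int × Int) (i : Int) : Int × Int × Int × Int :=
  let v := PySem.List.pyGetD data i 0
  let p := if v > s.1 then (i, v) else (s.2.2.2, s.1)          -- (max_index, max)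
  let q := if v < s.2.1 then (i, v) else (s.2.2.1, s.2.1)      -- (min_index, min)
  (p.2, q.2, q.1, p.1)

def conaway (data : List Int) : Int :=
  let v0 := PySem.List.pyGetD data 0 0
  let st := (PySem.List.pyRange 1 data.length 1).foldl (conawayStep data) (v0, v0, 0, 0)
  if st.2.2.1 > st.2.2.2 then st.2.2.1 else st.2.2.2

-- ===== PORT B =====
def conaway_alt (data : List Int) : Int :=
  let first := (PySem.List.enumerate data 0).foldl
      (fun d p => PySem.Dict.setdefault d p.2 p.1) PySem.Dict.empty
  -- max(first) / min(first) iterate the dict's keys; empty data raises (outside Pre_)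
  match PySem.List.max? first.keys (fun x => x), PySem.List.min? first.keys (fun x => x) with
  | some M, some m => max (first.getD M 0) (first.getD m 0)
  | _, _ => 0

-- ===== PRECONDITION & SPEC =====
-- A raises IndexError (data[0]) on the empty list; Pre_ excludes exactly that input.
def Pre_conaway (data : List Int) : Prop := data ≠ []
instance (data : List Int) : Decidable (Pre_conaway data) := by unfold Pre_conaway; infer_instance
def pvWitness_conaway : List Int := [3, 1, 3]

def Spec_conaway (data : List Int) (out : Int) : Prop := out = conaway_alt data
instance (data : List Int) (out : Int) : Decidable (Spec_conaway data out) := by unfold Spec_conaway; infer_instance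

-- ===== CLAIM (what is proved, stated in full; the proofs are below) =====
def Claim_equal_conaway : Prop := ∀ (data : List Int), Dom_conaway data → Pre_conaway data → Spec_conaway data (conaway data)

-- ===== LEMMAS AND PROOFS =====

-- A's loop body, on an (index, value) pair instead of an index into data
def stepP (s : Int × Int × Int × Int) (p : Int × Int) : Int × Int × Int × Int :=
  (if p.2 > s.1 then p.2 else s.1, if p.2 < s.2.1 then p.2 else s.2.1,
   (if p.2 < s.2.1 then p.1 else s.2.2.1), (if p.2 > s.1 then p.1 else s.2.2.2))

-- B's dict-building fold
def dfold (data : List Int) : PySem.Dict Int Int :=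
  (PySem.List.enumerate data 0).foldl (fun d p => PySem.Dict.setdefault d p.2 p.1) PySem.Dict.empty

-- A's fold over the index range 1..len equals the structural fold of stepP over enumerate
lemma A_fold_eq (x : Int) (rest : List Int) :
    (PySem.List.pyRange 1 ((x :: rest).length : Int) 1).foldl (conawayStep (x :: rest)) (x, x, 0, 0)
      = (PySem.List.enumerate rest 1).foldl stepP (x, x, 0, 0) := by
  have hr : PySem.List.pyRange 1 ((x :: rest).length : Int) 1
      = (PySem.List.enumerate rest 1).map (fun p => p.1) := by
    rw [PySem.List.map_fst_enumerate]
    congr 1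
    simp
    omega
  rw [hr, List.foldl_map]
  apply PySem.List.foldl_congr_mem
  intro acc p hp
  rcases (PySem.List.mem_enumerate_iff rest 1 p).1 hp with ⟨k, hk, rfl⟩
  have hget : PySem.List.pyGetD (x :: rest) (1 + (k : Int)) 0 = rest[k] := by
    rw [PySem.List.pyGetD_eq_getElem (x :: rest) 0 (by omega) (by simp; omega)]
    have : ((1 : Int) + k).toNat = k + 1 := by omega
    simp [this]
  simp only [conawayStep, stepP, hget]
  split_ifs <;> rfl

-- the joint invariant of A's state fold and B's dict fold over the same list
lemma inv_main (x : Int) (rest : List Int) :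
    (∀ v : Int, ((dfold (x :: rest)).get? v).isSome = true ↔ v ∈ x :: rest) ∧
    (∀ v ∈ x :: rest, v ≤ ((PySem.List.enumerate (x :: rest) 0).foldl stepP (x, x, 0, 0)).1) ∧
    (∀ v ∈ x :: rest, ((PySem.List.enumerate (x :: rest) 0).foldl stepP (x, x, 0, 0)).2.1 ≤ v) ∧
    ((PySem.List.enumerate (x :: rest) 0).foldl stepP (x, x, 0, 0)).1 ∈ x :: rest ∧
    ((PySem.List.enumerate (x :: rest) 0).foldl stepP (x, x, 0, 0)).2.1 ∈ x :: rest ∧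
    (dfold (x :: rest)).get? ((PySem.List.enumerate (x :: rest) 0).foldl stepP (x, x, 0, 0)).1
      = some ((PySem.List.enumerate (x :: rest) 0).foldl stepP (x, x, 0, 0)).2.2.2 ∧
    (dfold (x :: rest)).get? ((PySem.List.enumerate (x :: rest) 0).foldl stepP (x, x, 0, 0)).2.1
      = some ((PySem.List.enumerate (x :: rest) 0).foldl stepP (x, x, 0, 0)).2.2.1 := by
  induction rest using List.reverseRecOn with
  | nil =>
    have hd : dfold [x] = PySem.Dict.empty.insert x 0 := by
      unfold dfold
      simp only [PySem.List.enumerate_cons, PySem.List.enumerate_nil, List.foldl_cons, List.foldl_nil]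
      rw [PySem.Dict.setdefault_of_not_contains _ _ (PySem.Dict.contains_empty x)]
    have hs : (PySem.List.enumerate [x] 0).foldl stepP (x, x, 0, 0) = (x, x, 0, 0) := by
      simp [PySem.List.enumerate_cons, PySem.List.enumerate_nil, stepP]
    rw [hd, hs]
    refine ⟨?_, ?_, ?_, ?_, ?_, ?_, ?_⟩
    · intro v
      rw [PySem.Dict.get?_insert]
      by_cases hv : v = x <;> simp [hv, PySem.Dict.get?_empty]
    · intro v hv; simp at hv; simp [hv]
    · intro v hv; simp at hv; simp [hv]
    · simp
    · simp
    · exact PySem.Dict.get?_insert_self _ _ _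
    · exact PySem.Dict.get?_insert_self _ _ _
  | append_singleton r v0 ih =>
    have hsplit : x :: (r ++ [v0]) = (x :: r) ++ [v0] := by simp
    have he : PySem.List.enumerate ((x :: r) ++ [v0]) 0
        = PySem.List.enumerate (x :: r) 0 ++ [(((x :: r).length : Int), v0)] := by
      rw [PySem.List.enumerate_append]
      simp [PySem.List.enumerate_cons, PySem.List.enumerate_nil]
    have hd : dfold ((x :: r) ++ [v0])
        = PySem.Dict.setdefault (dfold (x :: r)) v0 ((x :: r).length : Int) := by
      unfold dfold
      rw [he, List.foldl_append]
      rfl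
    have hsfold : (PySem.List.enumerate ((x :: r) ++ [v0]) 0).foldl stepP (x, x, 0, 0)
        = stepP ((PySem.List.enumerate (x :: r) 0).foldl stepP (x, x, 0, 0)) (((x :: r).length : Int), v0) := by
      rw [he, List.foldl_append]
      rfl
    obtain ⟨i1, i2, i3, i4, i5, i6, i7⟩ := ih
    set sold := (PySem.List.enumerate (x :: r) 0).foldl stepP (x, x, 0, 0) with hsolddef
    set dold := dfold (x :: r) with hdolddef
    have hcont : dold.contains v0 = true ↔ v0 ∈ x :: r := by
      rw [PySem.Dict.contains_eq_isSome_get?]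
      exact i1 v0
    have hmem : ∀ v : Int, v ∈ (x :: r) ++ [v0] ↔ v ∈ x :: r ∨ v = v0 := by
      intro v; simp [List.mem_append, List.mem_cons, or_assoc]
    rw [hsplit, hd, hsfold]
    -- compute the new state
    by_cases hm : v0 > sold.1
    · -- new max: v0 was never seen before
      have hnotin : v0 ∉ x :: r := fun h => absurd (i2 v0 h) (not_le.mpr hm)
      have hc : dold.contains v0 = false := by
        exact Bool.eq_false_iff.mpr (fun h => hnotin (hcont.mp h))
      rw [PySem.Dict.setdefault_of_not_contains _ _ hc]
      have hn : ¬ v0 < sold.2.1 := by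
        have := i3 x (List.mem_cons_self)
        have := i2 x (List.mem_cons_self)
        omega
      simp only [stepP, if_pos hm, if_neg hn]
      refine ⟨?_, ?_, ?_, ?_, ?_, ?_, ?_⟩
      · intro v
        rw [PySem.Dict.get?_insert]
        by_cases hv : v = v0 <;> simp [hv, i1]
      · intro v hv
        rcases (hmem v).mp hv with h | rfl
        · have := i2 v h; omega
        · omega
      · intro v hv
        rcases (hmem v).mp hv with h | rfl
        · exact i3 v h
        · have := i3 x List.mem_cons_self
          have := i2 x List.mem_cons_self
          omega
      · exact (hmem v0).mpr (Or.inr rfl)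
      · exact (hmem sold.2.1).mpr (Or.inl i5)
      · rw [PySem.Dict.get?_insert_self]
      · rw [PySem.Dict.get?_insert]
        have hne : sold.2.1 ≠ v0 := fun h => hnotin (h ▸ i5)
        rw [if_neg hne]
        exact i7
    · by_cases hn : v0 < sold.2.1
      · -- new min: v0 never seen before
        have hnotin : v0 ∉ x :: r := fun h => absurd (i3 v0 h) (not_le.mpr hn)
        have hc : dold.contains v0 = false := by
          exact Bool.eq_false_iff.mpr (fun h => hnotin (hcont.mp h))
        rw [PySem.Dict.setdefault_of_not_contains _ _ hc]
        simp only [stepP, if_neg hm, if_pos hn]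
        refine ⟨?_, ?_, ?_, ?_, ?_, ?_, ?_⟩
        · intro v
          rw [PySem.Dict.get?_insert]
          by_cases hv : v = v0 <;> simp [hv, i1]
        · intro v hv
          rcases (hmem v).mp hv with h | rfl
          · exact i2 v h
          · omega
        · intro v hv
          rcases (hmem v).mp hv with h | rfl
          · have := i3 v h; omega
          · omega
        · exact (hmem sold.1).mpr (Or.inl i4)
        · exact (hmem v0).mpr (Or.inr rfl)
        · rw [PySem.Dict.get?_insert]
          have hne : sold.1 ≠ v0 := fun h => hnotin (h ▸ i4)
          rw [if_neg hne]
          exact i6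
        · rw [PySem.Dict.get?_insert_self]
      · -- neither: state unchanged
        simp only [stepP, if_neg hm, if_neg hn]
        by_cases hc : dold.contains v0 = true
        · rw [PySem.Dict.setdefault_of_contains _ _ hc]
          refine ⟨?_, ?_, ?_, ?_, ?_, ?_, ?_⟩
          · intro v
            rw [i1 v, hmem]
            constructor
            · exact Or.inl
            · rintro (h | rfl)
              · exact h
              · exact hcont.mp hc
          · intro v hv
            rcases (hmem v).mp hv with h | rfl
            · exact i2 v h
            · omega
          · intro v hv
            rcases (hmem v).mp hv with h | rfl
            · exact i3 v h
            · omega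
          · exact (hmem sold.1).mpr (Or.inl i4)
          · exact (hmem sold.2.1).mpr (Or.inl i5)
          · exact i6
          · exact i7
        · have hc' : dold.contains v0 = false := Bool.eq_false_iff.mpr hc
          have hnotin : v0 ∉ x :: r := fun h => hc (hcont.mpr h)
          rw [PySem.Dict.setdefault_of_not_contains _ _ hc']
          refine ⟨?_, ?_, ?_, ?_, ?_, ?_, ?_⟩
          · intro v
            rw [PySem.Dict.get?_insert]
            by_cases hv : v = v0 <;> simp [hv, i1]
          · intro v hv
            rcases (hmem v).mp hv with h | rfl
            · exact i2 v h
            · omega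
          · intro v hv
            rcases (hmem v).mp hv with h | rfl
            · exact i3 v h
            · omega
          · exact (hmem sold.1).mpr (Or.inl i4)
          · exact (hmem sold.2.1).mpr (Or.inl i5)
          · rw [PySem.Dict.get?_insert]
            have hne : sold.1 ≠ v0 := fun h => hnotin (h ▸ i4)
            rw [if_neg hne]
            exact i6
          · rw [PySem.Dict.get?_insert]
            have hne : sold.2.1 ≠ v0 := fun h => hnotin (h ▸ i5)
            rw [if_neg hne]
            exact i7

-- ===== VERDICT (by name: the statement is the Claim_ definition above) =====
theorem conaway_spec : Claim_equal_conaway := by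
  intro data _ hpre
  obtain ⟨x, rest, rfl⟩ : ∃ x rest, data = x :: rest := by
    cases data with
    | nil => exact absurd rfl hpre
    | cons a l => exact ⟨a, l, rfl⟩
  unfold Spec_conaway conaway conaway_alt
  have hv0 : PySem.List.pyGetD (x :: rest) 0 0 = x := by simp [PySem.List.pyGetD]
  obtain ⟨i1, i2, i3, i4, i5, i6, i7⟩ := inv_main x rest
  have hA : (PySem.List.pyRange 1 ((x :: rest).length : Int) 1).foldl (conawayStep (x :: rest)) (x, x, 0, 0)
      = (PySem.List.enumerate (x :: rest) 0).foldl stepP (x, x, 0, 0) := by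
    rw [A_fold_eq, PySem.List.enumerate_cons, List.foldl_cons]
    have h0 : stepP (x, x, 0, 0) (0, x) = (x, x, 0, 0) := by simp [stepP]
    rw [h0]
    norm_num
  set s := (PySem.List.enumerate (x :: rest) 0).foldl stepP (x, x, 0, 0) with hsdef
  have hfirst : (PySem.List.enumerate (x :: rest) 0).foldl
      (fun d p => PySem.Dict.setdefault d p.2 p.1) PySem.Dict.empty = dfold (x :: rest) := rfl
  have hkeys : ∀ k : Int, k ∈ (dfold (x :: rest)).keys ↔ k ∈ x :: rest := by
    intro k
    rw [← PySem.Dict.contains_iff_mem_keys, PySem.Dict.contains_eq_isSome_get?]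
    exact i1 k
  simp only [hv0, hfirst, hA]
  cases hM : PySem.List.max? (dfold (x :: rest)).keys (fun x => x) with
  | none =>
    have : (dfold (x :: rest)).keys = [] := (PySem.List.max?_eq_none_iff _ _).mp hM
    exact absurd (this ▸ (hkeys s.1).mpr i4) List.not_mem_nil
  | some M =>
    cases hm : PySem.List.min? (dfold (x :: rest)).keys (fun x => x) with
    | none =>
      have : (dfold (x :: rest)).keys = [] := (PySem.List.min?_eq_none_iff _ _).mp hm
      exact absurd (this ▸ (hkeys s.1).mpr i4) List.not_mem_nil
    | some m =>
      have hM1 : M = s.1 :=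
        le_antisymm (i2 M ((hkeys M).mp (PySem.List.max?_mem hM)))
          (PySem.List.max?_isMax hM s.1 ((hkeys s.1).mpr i4))
      have hm1 : m = s.2.1 :=
        le_antisymm (PySem.List.min?_isMin hm s.2.1 ((hkeys s.2.1).mpr i5))
          (i3 m ((hkeys m).mp (PySem.List.min?_mem hm)))
      rw [hM1, hm1]
      dsimp only
      rw [PySem.Dict.getD_of_get?_eq_some _ _ i6,
        PySem.Dict.getD_of_get?_eq_some _ _ i7]
      rcases le_or_gt s.2.2.1 s.2.2.2 with h | h
      · rw [if_neg (not_lt.mpr h), max_eq_left h]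
      · rw [if_pos h, max_eq_right (le_of_lt h)]
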